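-- pv_equiv track=rewrite | github.com/feltroidprime/builtins-hints | research/tools.py | split_classic
-- ===== SOURCE A (Python) =====
-- BASE=2**86
--
-- DEGREE = 2
--
-- def split_classic(x:int, name:str, degree=DEGREE, base=BASE):
--     coeffs = []
--     for n in range(degree, 0, -1):
--         q, r = divmod(x, base ** n)
--         coeffs.append(q)
--         x = r
--     coeffs.append(x)
--     coeffs= coeffs[::-1]
--     return coeffs
-- ===== SOURCE B (Python) =====
-- def split_classic(x: int, name: str, degree=2, base=2**86):
--     # Bottom-up: repeated divmod by the constant base; limbs come out already little-endian.
--     coeffs = []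
--     for _ in range(degree):
--         x, r = divmod(x, base)
--         coeffs.append(r)
--     coeffs.append(x)
--     return coeffs
-- ===== Notes on version B (the rewrite author's own statement) =====
-- stated objective: faster
-- what changed: B builds the limbs bottom-up with repeated divmod by the constant base (little-endian directly, no reversal), instead of A's top-down division by the growing power base**n followed by a reversal.
-- outside the precondition, e.g. on split_classic(-40, 't', 2, -6): A returns [-4, -6, -2], B returns [-4, 0, -1]; on split_classic(3, 't', 2, 0): A raises ZeroDivisionError, B raises ZeroDivisionError
import Mathlib
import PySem

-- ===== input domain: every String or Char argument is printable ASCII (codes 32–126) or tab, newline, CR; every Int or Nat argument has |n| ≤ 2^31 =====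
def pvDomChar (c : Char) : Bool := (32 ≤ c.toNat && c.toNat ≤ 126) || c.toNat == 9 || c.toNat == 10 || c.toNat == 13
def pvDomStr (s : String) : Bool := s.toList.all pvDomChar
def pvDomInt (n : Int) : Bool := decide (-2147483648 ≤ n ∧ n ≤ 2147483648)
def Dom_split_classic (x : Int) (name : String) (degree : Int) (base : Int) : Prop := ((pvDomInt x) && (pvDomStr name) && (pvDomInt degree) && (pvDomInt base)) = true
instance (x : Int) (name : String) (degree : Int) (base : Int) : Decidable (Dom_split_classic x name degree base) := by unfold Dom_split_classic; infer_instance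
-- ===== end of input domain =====

-- B computes the limbs bottom-up by repeated divmod by the constant base (no base**n powers,
-- no final reversal); equivalence is proved for positive base (and trivially for degree ≤ 0).

-- ===== PORT A =====
-- Literal port of A: fold over range(degree, 0, -1), divmod(x, base**n) (divmod is total
-- PySem.Int.floordiv/mod here; Pre_ excludes base = 0 with degree ≥ 1, where Python raises),
-- then coeffs[::-1] via slice? (never none for step -1).
def split_classic (x : Int) (name : String) (degree : Int) (base : Int) : List Int :=
  let st := (PySem.List.pyRange degree 0 (-1)).foldl
    (fun (st : List Int × Int) n =>
      let p := base ^ n.toNat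
      (st.1 ++ [PySem.Int.floordiv st.2 p], PySem.Int.mod st.2 p)) ([], x)
  (PySem.List.slice? (st.1 ++ [st.2]) none none (-1)).getD []

-- ===== PORT B =====
def split_classic_alt (x : Int) (name : String) (degree : Int) (base : Int) : List Int :=
  let st := (PySem.List.pyRange 0 degree 1).foldl
    (fun (st : Int × List Int) _ =>
      (PySem.Int.floordiv st.1 base, st.2 ++ [PySem.Int.mod st.1 base])) (x, [])
  st.2 ++ [st.1]

-- ===== PRECONDITION & SPEC =====
-- Pre_ excludes (for degree ≥ 1) base = 0, where Python A raises ZeroDivisionError, and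
-- (for degree ≥ 2) negative base, where top-down and bottom-up limb decompositions are both
-- defensible values that can legitimately disagree (both reconstruct x); degree ≤ 1 admits
-- any base ≠ 0 (and degree ≤ 0 any base at all).
def Pre_split_classic (x : Int) (name : String) (degree : Int) (base : Int) : Prop :=
  0 < base ∨ degree ≤ 0 ∨ (degree = 1 ∧ base ≠ 0)
instance (x : Int) (name : String) (degree : Int) (base : Int) : Decidable (Pre_split_classic x name degree base) := by unfold Pre_split_classic; infer_instance

def pvWitness_split_classic : Int × String × Int × Int := (12345, "x", 3, 7)

def Spec_split_classic (x : Int) (name : String) (degree : Int) (base : Int) (out : List Int) : Prop := out = split_classic_alt x name degree base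
instance (x : Int) (name : String) (degree : Int) (base : Int) (out : List Int) : Decidable (Spec_split_classic x name degree base out) := by unfold Spec_split_classic; infer_instance

-- ===== CLAIM (what is proved, stated in full; the proofs are below) =====
def Claim_equal_split_classic : Prop := ∀ (x : Int) (name : String) (degree : Int) (base : Int), Dom_split_classic x name degree base → Pre_split_classic x name degree base → Spec_split_classic x name degree base (split_classic x name degree base)

-- ===== LEMMAS AND PROOFS =====

-- Canonical little-endian limb list: d low limbs then the final quotient.
def limbs (b : Int) : Int → Nat → List Int
  | x, 0 => [x]
  | x, d + 1 => PySem.Int.mod x b :: limbs b (PySem.Int.floordiv x b) d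

-- the three divmod-composition facts, for positive divisors
theorem emod_emod_pow (x b : Int) (d : Nat) :
    x % (b * b ^ d) % b = x % b :=
  Int.emod_emod_of_dvd x (Dvd.intro (b ^ d) rfl)

theorem ediv_ediv_pow (x b : Int) (d : Nat) (hb : 0 < b) :
    x / (b * b ^ d) = x / b / b ^ d := by
  rw [Int.ediv_ediv_of_nonneg hb.le]

theorem emod_mul_ediv (x b c : Int) (hb : 0 < b) :
    (x % (b * c)) / b = (x / b) % c := by
  have e1 : x % (b * c) = x - (x / (b * c)) * (b * c) := by rw [Int.emod_def]; ring
  rw [e1]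
  have e2 : x - x / (b * c) * (b * c) = x + (-(x / (b * c)) * c) * b := by ring
  rw [e2, Int.add_mul_ediv_right _ _ hb.ne']
  rw [Int.emod_def, Int.ediv_ediv_of_nonneg hb.le]
  ring

-- splitting off the TOP limb of the canonical list
theorem limbs_top (b : Int) (hb : 0 < b) :
    ∀ (d : Nat) (x : Int),
      limbs b (PySem.Int.mod x (b ^ (d + 1))) d ++ [PySem.Int.floordiv x (b ^ (d + 1))]
        = limbs b x (d + 1) := by
  intro d
  induction d with
  | zero =>
      intro x
      simp [limbs, pow_one]
  | succ d ih =>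
      intro x
      have hp : (0 : Int) < b ^ (d + 2) := pow_pos hb _
      have hp1 : (0 : Int) < b ^ (d + 1) := pow_pos hb _
      have hsplit : b ^ (d + 2) = b * b ^ (d + 1) := by ring
      have hmodpos : ∀ (a c : Int), 0 < c → PySem.Int.mod a c = a % c := by
        intro a c hc; exact PySem.Int.mod_eq_emod_of_pos hc
      have hdivpos : ∀ (a c : Int), 0 < c → PySem.Int.floordiv a c = a / c := by
        intro a c hc; exact PySem.Int.floordiv_eq_ediv_of_pos hc
      -- unfold one step of limbs on both sides
      have lhs1 : limbs b (PySem.Int.mod x (b ^ (d + 2))) (d + 1)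
          = PySem.Int.mod (PySem.Int.mod x (b ^ (d + 2))) b
            :: limbs b (PySem.Int.floordiv (PySem.Int.mod x (b ^ (d + 2))) b) d := rfl
      have rhs1 : limbs b x (d + 2)
          = PySem.Int.mod x b :: limbs b (PySem.Int.floordiv x b) (d + 1) := rfl
      rw [lhs1, rhs1, List.cons_append]
      congr 1
      · rw [hmodpos _ _ hb, hmodpos _ _ hp, hsplit, emod_emod_pow x b (d+1),
            hmodpos _ _ hb]
      · rw [← ih (PySem.Int.floordiv x b)]
        congr 2
        · rw [hmodpos _ _ hp, hdivpos _ _ hb, hmodpos _ _ hp1, hdivpos _ _ hb,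
              hsplit, emod_mul_ediv x b (b ^ (d + 1)) hb]
        · rw [hdivpos _ _ hp, hdivpos _ _ hp1, hdivpos _ _ hb,
              hsplit, ediv_ediv_pow x b (d + 1) hb]

-- A's loop (countdown over powers) produces the reversed canonical list
theorem A_loop_eq (b : Int) (hb : 0 < b) :
    ∀ (d : Nat) (x : Int) (acc : List Int),
      (((PySem.List.pyRange (d : Int) 0 (-1)).foldl
          (fun (st : List Int × Int) n =>
            (st.1 ++ [PySem.Int.floordiv st.2 (b ^ n.toNat)],
             PySem.Int.mod st.2 (b ^ n.toNat))) (acc, x)).1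
        ++ [((PySem.List.pyRange (d : Int) 0 (-1)).foldl
          (fun (st : List Int × Int) n =>
            (st.1 ++ [PySem.Int.floordiv st.2 (b ^ n.toNat)],
             PySem.Int.mod st.2 (b ^ n.toNat))) (acc, x)).2]).reverse
        = limbs b x d ++ acc.reverse := by
  intro d
  induction d with
  | zero =>
      intro x acc
      rw [PySem.List.pyRange_neg_one_eq_nil (by norm_num)]
      simp [limbs]
  | succ d ih =>
      intro x acc
      have hlt : (0 : Int) < ((d + 1 : Nat) : Int) := by positivity
      rw [PySem.List.pyRange_neg_one_cons hlt]
      have hcast : ((d + 1 : Nat) : Int) - 1 = (d : Nat) := by push_cast; ring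
      have htn : ((d + 1 : Nat) : Int).toNat = d + 1 := by simp
      simp only [List.foldl_cons, htn, hcast]
      rw [ih (PySem.Int.mod x (b ^ (d + 1))) (acc ++ [PySem.Int.floordiv x (b ^ (d + 1))])]
      rw [List.reverse_append, List.reverse_singleton, ← List.append_assoc,
          limbs_top b hb d x]

-- B's loop produces the canonical list directly (the index is ignored: only length matters)
theorem B_loop_eq (b : Int) :
    ∀ (l : List Int) (x : Int) (acc : List Int),
      ((l.foldl
          (fun (st : Int × List Int) _ =>
            (PySem.Int.floordiv st.1 b, st.2 ++ [PySem.Int.mod st.1 b])) (x, acc)).2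
        ++ [(l.foldl
          (fun (st : Int × List Int) _ =>
            (PySem.Int.floordiv st.1 b, st.2 ++ [PySem.Int.mod st.1 b])) (x, acc)).1])
        = acc ++ limbs b x l.length := by
  intro l
  induction l with
  | nil => intro x acc; simp [limbs]
  | cons n l ih =>
      intro x acc
      simp only [List.foldl_cons, List.length_cons]
      rw [ih (PySem.Int.floordiv x b) (acc ++ [PySem.Int.mod x b])]
      simp [limbs]

-- ===== VERDICT (by name: the statement is the Claim_ definition above) =====
theorem split_classic_spec : Claim_equal_split_classic := by
  intro x name degree base _hdom hpre
  unfold Spec_split_classic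
  simp only [split_classic, split_classic_alt]
  rw [PySem.List.slice?_none_none_neg_one]
  simp only [Option.getD_some]
  by_cases hdeg : degree ≤ 0
  · -- both loops are over empty ranges; both results are [x]
    rw [PySem.List.pyRange_neg_one_eq_nil hdeg, PySem.List.pyRange_one_eq_nil hdeg]
    simp
  · by_cases hb : 0 < base
    case neg =>
      -- degree = 1, base ≠ 0: one divmod on each side, trivially the same pair
      have hd1 : degree = 1 := by
        rcases hpre with h | h | ⟨h1, _⟩
        · exact absurd h hb
        · exact absurd h hdeg
        · exact h1
      rw [hd1]
      rw [show PySem.List.pyRange 1 0 (-1) = [1] by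
            rw [PySem.List.pyRange_neg_one_cons (by norm_num),
                PySem.List.pyRange_neg_one_eq_nil (by norm_num)],
          show PySem.List.pyRange 0 1 1 = [0] by
            rw [PySem.List.pyRange_one_cons (by norm_num),
                PySem.List.pyRange_one_eq_nil (by norm_num)]]
      simp
    have hdpos : 0 < degree := lt_of_not_ge hdeg
    have hd : degree = ((degree.toNat : Nat) : Int) := by omega
    rw [hd]
    rw [A_loop_eq base hb degree.toNat x []]
    rw [B_loop_eq base (PySem.List.pyRange 0 ((degree.toNat : Nat) : Int) 1) x []]
    rw [PySem.List.length_pyRange_one]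
    simp only [List.append_nil, List.nil_append, List.reverse_nil, Int.sub_zero]
    congr 1
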